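-- pv_equiv track=rewrite | github.com/MingusGao/Swin-UNet-For-LV | Swin-UNet-For-LV/dataset/preprocess_data_dynamic.py | _window_indices
-- ===== SOURCE A (Python) =====
-- def _window_indices(T: int, center: int, window: int) -> list:
--     beg = max(center - window, 0)
--     end = min(center + window, T - 1)
--     idx = list(range(beg, end + 1))
--     while len(idx) < 2 * window + 1:
--         if idx[0] > 0:
--             idx.insert(0, idx[0] - 1)
--         else:
--             idx.append(min(idx[-1] + 1, T - 1))
--     return idx
-- ===== SOURCE B (Python) =====
-- def _window_indices(T: int, center: int, window: int) -> list:
--     if window < 0: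
--         return []
--     beg = max(center - window, 0)
--     end = min(center + window, T - 1)
--     n = end - beg + 1
--     need = 2 * window + 1
--     if need <= n:
--         return list(range(beg, end + 1))
--     d = need - n
--     left = min(d, beg)
--     right = d - left
--     return list(range(beg - left, end + 1)) + [min(end + k, T - 1) for k in range(1, right + 1)]
-- ===== Notes on version B (the rewrite author's own statement) =====
-- stated objective: faster
-- what changed: Replaces the element-by-element while loop (each left extension an O(n) list.insert(0,...)) with a closed-form computation of the left/right extension counts and direct list construction in one pass.
import Mathlib
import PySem

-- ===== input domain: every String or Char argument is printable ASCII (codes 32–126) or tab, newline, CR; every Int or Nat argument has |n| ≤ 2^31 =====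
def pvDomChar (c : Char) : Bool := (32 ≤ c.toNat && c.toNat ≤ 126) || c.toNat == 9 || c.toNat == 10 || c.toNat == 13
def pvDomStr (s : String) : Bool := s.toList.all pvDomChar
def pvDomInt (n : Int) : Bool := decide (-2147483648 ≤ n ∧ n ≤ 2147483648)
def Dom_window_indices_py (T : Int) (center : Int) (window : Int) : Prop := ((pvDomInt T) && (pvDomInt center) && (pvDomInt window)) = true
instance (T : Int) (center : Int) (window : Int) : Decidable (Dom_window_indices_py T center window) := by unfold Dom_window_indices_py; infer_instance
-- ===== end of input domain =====

-- B replaces A's element-by-element while loop by a closed-form computation of the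
-- left/right extension counts (O(window) instead of O(window^2) list operations).

-- ===== PORT A =====
-- A's while loop: the fuel argument only makes it total; each iteration grows idx by
-- one element, so fuel = (2*window+1).toNat always suffices.  idx = [] is where the
-- Python raises IndexError (excluded by Pre_); the [] returned there is never claimed.
def windowA_go (T : Int) (lim : Int) (fuel : Nat) (idx : List Int) : List Int :=
  match fuel with
  | 0 => idx
  | f + 1 =>
    if (idx.length : Int) < lim then
      match idx with
      | [] => []
      | x :: rest =>
        if x > 0 then windowA_go T lim f ((x - 1) :: x :: rest)
        else windowA_go T lim f ((x :: rest) ++ [min ((x :: rest).getLastD 0 + 1) (T - 1)])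
    else idx

def window_indices_py (T : Int) (center : Int) (window : Int) : List Int :=
  let beg := max (center - window) 0
  let e := min (center + window) (T - 1)
  let idx := PySem.List.pyRange beg (e + 1) 1
  windowA_go T (2 * window + 1) (2 * window + 1).toNat idx

-- ===== PORT B =====
def window_indices_py_alt (T : Int) (center : Int) (window : Int) : List Int :=
  if window < 0 then []
  else
    let beg := max (center - window) 0
    let e := min (center + window) (T - 1)
    let n := e - beg + 1
    let need := 2 * window + 1
    if need ≤ n then PySem.List.pyRange beg (e + 1) 1
    else
      let d := need - n
      let left := min d beg
      let right := d - left
      PySem.List.pyRange (beg - left) (e + 1) 1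
        ++ (List.range right.toNat).map (fun (k : Nat) => min (e + ((k : Int) + 1)) (T - 1))

-- ===== PRECONDITION & SPEC =====
-- Pre_ excludes exactly the inputs where A raises IndexError: window ≥ 0 with an
-- initially empty clamped range (Python evaluates idx[0] on an empty list there).
def Pre_window_indices_py (T : Int) (center : Int) (window : Int) : Prop :=
  window < 0 ∨ max (center - window) 0 ≤ min (center + window) (T - 1)
instance (T : Int) (center : Int) (window : Int) : Decidable (Pre_window_indices_py T center window) := by unfold Pre_window_indices_py; infer_instance
def pvWitness_window_indices_py : Int × Int × Int := (10, 2, 3)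
def Spec_window_indices_py (T : Int) (center : Int) (window : Int) (out : List Int) : Prop := out = window_indices_py_alt T center window
instance (T : Int) (center : Int) (window : Int) (out : List Int) : Decidable (Spec_window_indices_py T center window out) := by unfold Spec_window_indices_py; infer_instance

-- ===== CLAIM (what is proved, stated in full; the proofs are below) =====
def Claim_equal_window_indices_py : Prop := ∀ (T : Int) (center : Int) (window : Int), Dom_window_indices_py T center window → Pre_window_indices_py T center window → Spec_window_indices_py T center window (window_indices_py T center window)

-- ===== LEMMAS AND PROOFS =====

-- key loop characterisation: on a nonempty state with head a ≥ 0, the loop result is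
-- the closed form: extend to the left down to max(a - d, 0), then extend to the right
-- with clamped successors of the last element.
lemma windowA_go_spec (T lim : Int) (fuel : Nat) : ∀ (a : Int) (tl : List Int),
    0 ≤ a →
    (lim - ((a :: tl).length : Int)).toNat ≤ fuel →
    windowA_go T lim fuel (a :: tl) =
      (if lim - ((a :: tl).length : Int) ≤ 0 then a :: tl
       else
         let d := lim - ((a :: tl).length : Int)
         let L := min d a
         PySem.List.pyRange (a - L) (a + 1) 1 ++ tl
           ++ (List.range (d - L).toNat).map
                (fun (k : Nat) => min ((a :: tl).getLastD 0 + ((k : Int) + 1)) (T - 1))) := by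
  induction fuel with
  | zero =>
    intro a tl _ hfuel
    have hd : lim - ((a :: tl).length : Int) ≤ 0 := by omega
    rw [if_pos hd]
    rfl
  | succ f ih =>
    intro a tl ha hfuel
    by_cases hd : lim - ((a :: tl).length : Int) ≤ 0
    · have hlt : ¬ (((a :: tl).length : Int) < lim) := by omega
      rw [if_pos hd]
      show (if (((a :: tl).length : Int) < lim) then _ else _) = _
      rw [if_neg hlt]
    · have hlt : (((a :: tl).length : Int) < lim) := by omega
      rw [if_neg hd]
      show (if (((a :: tl).length : Int) < lim) then
              (if a > 0 then windowA_go T lim f ((a - 1) :: a :: tl)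
               else windowA_go T lim f ((a :: tl) ++ [min ((a :: tl).getLastD 0 + 1) (T - 1)])) else _) = _
      rw [if_pos hlt]
      by_cases hpos : a > 0
      · -- prepend step
        rw [if_pos hpos]
        rw [ih (a - 1) (a :: tl) (by omega)
              (by simp only [List.length_cons] at hfuel ⊢; omega)]
        have hlast : ((a - 1) :: a :: tl).getLastD 0 = (a :: tl).getLastD 0 := rfl
        by_cases hd1 : lim - (((a - 1) :: a :: tl).length : Int) ≤ 0
        · -- exactly one step remained
          have h1 : lim - ((a :: tl).length : Int) = 1 := by
            simp only [List.length_cons] at hd1 hd ⊢; push_cast at *; omega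
          rw [if_pos hd1]
          simp only [h1]
          rw [show min (1 : Int) a = 1 from by omega]
          rw [show ((1 : Int) - 1).toNat = 0 from rfl]
          rw [PySem.List.pyRange_one_cons (by omega), PySem.List.pyRange_one_cons (by omega),
              PySem.List.pyRange_one_eq_nil (by omega)]
          simp
        · rw [if_neg hd1]
          simp only [hlast, List.length_cons] at *
          push_cast at *
          have h1 : min (lim - ((tl.length : Int) + 1 + 1)) (a - 1)
              = min (lim - ((tl.length : Int) + 1)) a - 1 := by omega
          have h2 : lim - ((tl.length : Int) + 1 + 1) - (min (lim - ((tl.length : Int) + 1)) a - 1)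
              = lim - ((tl.length : Int) + 1) - min (lim - ((tl.length : Int) + 1)) a := by ring
          rw [h1, h2]
          rw [show a - 1 - (min (lim - ((tl.length : Int) + 1)) a - 1)
                = a - min (lim - ((tl.length : Int) + 1)) a from by ring]
          rw [show a - 1 + 1 = a from by ring]
          have hLb : 1 ≤ min (lim - ((tl.length : Int) + 1)) a := by omega
          rw [PySem.List.pyRange_one_succ_right
                (a := a - min (lim - ((tl.length : Int) + 1)) a) (by omega)]
          simp [List.append_assoc]
      · -- append step; here a = 0
        have ha0 : a = 0 := by omega
        rw [if_neg hpos]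
        subst ha0
        set l := ((0 : Int) :: tl).getLastD 0 with hl
        set m := min (l + 1) (T - 1) with hm
        have hcons : ((0 : Int) :: tl) ++ [m] = 0 :: (tl ++ [m]) := rfl
        rw [hcons, ih 0 (tl ++ [m]) le_rfl
              (by simp at hd hfuel ⊢
                  omega)]
        have hlast2 : ((0 : Int) :: (tl ++ [m])).getLastD 0 = m := by
          rw [List.getLastD_cons, List.getLastD_concat]
        by_cases hd1 : lim - (((0 : Int) :: (tl ++ [m])).length : Int) ≤ 0
        · -- exactly one step remained
          rw [if_pos hd1]
          simp only [List.length_cons, List.length_append, List.length_nil,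
              Nat.cast_add, Nat.cast_one, zero_add] at hd1 hd ⊢
          have h1 : lim - ((tl.length : Int) + 1) = 1 := by omega
          simp only [h1]
          rw [show min (1 : Int) 0 = 0 from rfl, show (0 : Int) - 0 = 0 from rfl,
              show ((1 : Int) - 0).toNat = 1 from rfl]
          rw [PySem.List.pyRange_one_cons (by omega), PySem.List.pyRange_one_eq_nil (by omega)]
          simp [hm]
        · rw [if_neg hd1]
          simp only [hlast2, List.length_cons, List.length_append, List.length_nil,
              Nat.cast_add, Nat.cast_one, zero_add] at hd1 hd ⊢
          have hmin0 : min (lim - ((tl.length : Int) + 1 + 1)) (0 : Int) = 0 := by omega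
          have hmin0' : min (lim - ((tl.length : Int) + 1)) (0 : Int) = 0 := by omega
          rw [hmin0, hmin0']
          simp only [sub_zero]
          have hr : (lim - ((tl.length : Int) + 1)).toNat
              = (lim - ((tl.length : Int) + 1 + 1)).toNat + 1 := by omega
          rw [hr, List.range_succ_eq_map]
          have hstep : ((fun k : Nat => min (l + ((k : Int) + 1)) (T - 1)) ∘ Nat.succ)
              = (fun k : Nat => min (m + ((k : Int) + 1)) (T - 1)) := by
            funext k
            simp only [Function.comp, hm]
            push_cast
            omega
          rw [List.map_cons, List.map_map, hstep]
          rw [show min (l + (((0 : Nat) : Int) + 1)) (T - 1) = m from by rw [hm]; norm_num]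
          simp [List.append_assoc]

-- last element of a nonempty ascending unit range
lemma getLastD_pyRange (a b : Int) (h : a ≤ b) :
    (PySem.List.pyRange a (b + 1) 1).getLastD 0 = b := by
  rw [PySem.List.pyRange_one_succ_right h]
  simp

theorem window_indices_py_spec : Claim_equal_window_indices_py := by
  intro T center window _ hpre
  unfold Spec_window_indices_py window_indices_py window_indices_py_alt
  simp only []
  by_cases hw : window < 0
  · -- empty range, loop not entered (fuel = 0)
    have hfuel : (2 * window + 1).toNat = 0 := by omega
    have hempty : PySem.List.pyRange (max (center - window) 0)
        (min (center + window) (T - 1) + 1) 1 = [] :=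
      PySem.List.pyRange_one_eq_nil (by omega)
    rw [if_pos hw, hfuel, hempty]
    simp [windowA_go]
  · rw [if_neg hw]
    have hble : max (center - window) 0 ≤ min (center + window) (T - 1) := by
      rcases hpre with h | h
      · omega
      · exact h
    set beg := max (center - window) 0 with hbeg
    set e := min (center + window) (T - 1) with he
    have hbeg0 : 0 ≤ beg := by omega
    have hcons : PySem.List.pyRange beg (e + 1) 1
        = beg :: PySem.List.pyRange (beg + 1) (e + 1) 1 :=
      PySem.List.pyRange_one_cons (by omega)
    have hlen : ((beg :: PySem.List.pyRange (beg + 1) (e + 1) 1).length : Int)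
        = e - beg + 1 := by
      simp [PySem.List.length_pyRange_one]; omega
    have hlast : (beg :: PySem.List.pyRange (beg + 1) (e + 1) 1).getLastD 0 = e := by
      rw [← hcons]; exact getLastD_pyRange beg e hble
    rw [hcons, windowA_go_spec T (2 * window + 1) (2 * window + 1).toNat beg _ hbeg0
          (by rw [hlen]; omega)]
    rw [hlen, hlast]
    by_cases hfit : 2 * window + 1 ≤ e - beg + 1
    · rw [if_pos (by omega), if_pos hfit]
    · rw [if_neg (by omega), if_neg hfit]
      simp only []
      rw [PySem.List.pyRange_one_append
            (beg - min (2 * window + 1 - (e - beg + 1)) beg) (beg + 1) (e + 1)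
            (by omega) (by omega)]

-- ===== VERDICT (by name: the statement is the Claim_ definition above) =====
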